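-- pv_equiv track=rewrite | github.com/LisaisonOS/debian | iso-builder/overlays/et-v2-general/opt/emcomm-tools/lib/et_supervisor/mode_engine.py | _ini_update_rig
-- ===== SOURCE A (Python) =====
-- def _ini_update_rig(lines, myrig):
--     """Update MyRIG in VarAC.ini — replace first word, keep rest.
--
--     Preserves any trailing description like 'emcomm-tools.ca' that
--     the user may have added.
--
--     Returns:
--         Modified list of lines.
--     """
--     key_lower = "myrig="
--     for i, line in enumerate(lines):
--         stripped = line.strip()
--         if stripped.lower().startswith(key_lower):
--             eq_pos = stripped.index("=")
--             current_val = stripped[eq_pos + 1:]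
--             parts = current_val.split(None, 1)
--             if len(parts) > 1:
--                 lines[i] = f"MyRIG={myrig} {parts[1]}\n"
--             else:
--                 lines[i] = f"MyRIG={myrig}\n"
--             return lines
--
--     # Not found — add to [MY_INFO] section
--     for i, line in enumerate(lines):
--         if line.strip().lower() == "[my_info]":
--             lines.insert(i + 1, f"MyRIG={myrig} emcomm-tools.ca\n")
--             return lines
--
--     return lines
-- ===== SOURCE B (Python) =====
-- def _ini_update_rig(lines, myrig):
--     """Update MyRIG in VarAC.ini in a single pass over the lines."""
--     my_info_idx = None
--     for i, line in enumerate(lines):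
--         stripped = line.strip()
--         low = stripped.lower()
--         if low.startswith("myrig="):
--             current_val = stripped[stripped.index("=") + 1:]
--             parts = current_val.split(None, 1)
--             if len(parts) > 1:
--                 lines[i] = f"MyRIG={myrig} {parts[1]}\n"
--             else:
--                 lines[i] = f"MyRIG={myrig}\n"
--             return lines
--         if my_info_idx is None and low == "[my_info]":
--             my_info_idx = i
--     if my_info_idx is not None:
--         lines.insert(my_info_idx + 1, f"MyRIG={myrig} emcomm-tools.ca\n")
--     return lines
-- ===== Notes on version B (the rewrite author's own statement) =====
-- stated objective: alternative
-- what changed: The two sequential scans (update-key scan, then a second full scan to find the [MY_INFO] section) are merged into one pass that records the first [MY_INFO] index while scanning and inserts by that index only if no MyRIG key was found.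
import Mathlib
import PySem

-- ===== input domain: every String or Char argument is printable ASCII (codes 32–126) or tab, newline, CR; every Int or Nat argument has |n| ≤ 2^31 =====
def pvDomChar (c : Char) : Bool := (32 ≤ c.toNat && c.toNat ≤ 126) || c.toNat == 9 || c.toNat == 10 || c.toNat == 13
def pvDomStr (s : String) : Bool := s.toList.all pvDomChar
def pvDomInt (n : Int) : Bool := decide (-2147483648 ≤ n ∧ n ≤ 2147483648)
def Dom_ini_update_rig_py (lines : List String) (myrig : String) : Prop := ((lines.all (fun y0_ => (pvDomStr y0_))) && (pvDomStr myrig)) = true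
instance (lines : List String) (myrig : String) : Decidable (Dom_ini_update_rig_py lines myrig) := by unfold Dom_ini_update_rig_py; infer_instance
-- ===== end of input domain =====

-- B merges A's two sequential scans into a single pass that records the first
-- [MY_INFO] index on the way; return-value equivalence only (both Pythons also
-- mutate `lines` in place, in the same way).

-- ===== PORT A =====
-- first loop of A: replace the first MyRIG= line, or none
def iniALoop1 (myrig : String) : List String → Option (List String)
  | [] => none
  | line :: rest =>
    let stripped := PySem.Str.strip line
    if PySem.Str.startswith (PySem.Str.lower stripped) "myrig=" then
      let eqPos := PySem.Str.find stripped "="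
      let currentVal := PySem.Str.slice stripped (some (eqPos + 1)) none
      let parts := PySem.Str.split₀Max currentVal 1
      if parts.length > 1 then
        some (PySem.Str.join "" ["MyRIG=", myrig, " ", parts.getD 1 "", "\n"] :: rest)
      else
        some (PySem.Str.join "" ["MyRIG=", myrig, "\n"] :: rest)
    else
      (iniALoop1 myrig rest).map (line :: ·)

-- second loop of A: insert after the first [my_info] line, or none
def iniALoop2 (myrig : String) : List String → Option (List String)
  | [] => none
  | line :: rest =>
    if PySem.Str.lower (PySem.Str.strip line) == "[my_info]" then
      some (line :: PySem.Str.join "" ["MyRIG=", myrig, " emcomm-tools.ca\n"] :: rest)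
    else
      (iniALoop2 myrig rest).map (line :: ·)

def ini_update_rig_py (lines : List String) (myrig : String) : List String :=
  match iniALoop1 myrig lines with
  | some r => r
  | none =>
    match iniALoop2 myrig lines with
    | some r => r
    | none => lines

-- ===== PORT B =====
-- B's single loop: fst = updated list if a MyRIG= line was found, snd = my_info_idx
def iniBGo (myrig : String) : List String → Option Nat → Nat → Option (List String) × Option Nat
  | [], idx?, _ => (none, idx?)
  | line :: rest, idx?, i =>
    let stripped := PySem.Str.strip line
    let low := PySem.Str.lower stripped
    if PySem.Str.startswith low "myrig=" then
      let eqPos := PySem.Str.find stripped "="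
      let currentVal := PySem.Str.slice stripped (some (eqPos + 1)) none
      let parts := PySem.Str.split₀Max currentVal 1
      if parts.length > 1 then
        (some (PySem.Str.join "" ["MyRIG=", myrig, " ", parts.getD 1 "", "\n"] :: rest), idx?)
      else
        (some (PySem.Str.join "" ["MyRIG=", myrig, "\n"] :: rest), idx?)
    else
      let idx?' := if idx?.isNone && (low == "[my_info]") then some i else idx?
      match iniBGo myrig rest idx?' (i + 1) with
      | (r?, j?) => (r?.map (line :: ·), j?)

def ini_update_rig_py_alt (lines : List String) (myrig : String) : List String :=
  match iniBGo myrig lines none 0 with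
  | (some r, _) => r
  | (none, some k) =>
      PySem.List.insert lines ((k : Int) + 1) (PySem.Str.join "" ["MyRIG=", myrig, " emcomm-tools.ca\n"])
  | (none, none) => lines

-- ===== PRECONDITION & SPEC =====
def Spec_ini_update_rig_py (lines : List String) (myrig : String) (out : List String) : Prop := out = ini_update_rig_py_alt lines myrig
instance (lines : List String) (myrig : String) (out : List String) : Decidable (Spec_ini_update_rig_py lines myrig out) := by unfold Spec_ini_update_rig_py; infer_instance

-- ===== CLAIM (what is proved, stated in full; the proofs are below) =====
def Claim_equal_ini_update_rig_py : Prop := ∀ (lines : List String) (myrig : String), Dom_ini_update_rig_py lines myrig → Spec_ini_update_rig_py lines myrig (ini_update_rig_py lines myrig)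

-- ===== LEMMAS AND PROOFS =====

lemma iniBGo_fst (myrig : String) (l : List String) (idx? : Option Nat) (i : Nat) :
    (iniBGo myrig l idx? i).1 = iniALoop1 myrig l := by
  induction l generalizing idx? i with
  | nil => rfl
  | cons line rest ih =>
    by_cases h1 : PySem.Str.startswith (PySem.Str.lower (PySem.Str.strip line)) "myrig=" = true
    · simp only [iniBGo, iniALoop1, if_pos h1]
      rw [apply_ite Prod.fst]
    · rw [Bool.not_eq_true] at h1
      simp only [iniBGo, iniALoop1, h1]
      simp [ih]
lemma opt_ite_ne_none {α : Type} {c : Prop} [Decidable c] (a b : α) :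
    (if c then some a else some b) ≠ none := by
  by_cases h : c <;> simp [h]

lemma iniBGo_snd_some (myrig : String) (l : List String) (k : Nat) (j : Nat) :
    (iniBGo myrig l (some k) j).2 = some k ∨ (iniBGo myrig l (some k) j).1 ≠ none := by
  induction l generalizing j with
  | nil => left; rfl
  | cons line rest ih =>
    by_cases h1 : PySem.Str.startswith (PySem.Str.lower (PySem.Str.strip line)) "myrig=" = true
    · right
      simp only [iniBGo, if_pos h1]
      rw [apply_ite Prod.fst]
      exact opt_ite_ne_none _ _
    · rw [Bool.not_eq_true] at h1
      rcases ih (j + 1) with h' | h'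
      · left; simp only [iniBGo, h1]; simpa using h'
      · right; simp only [iniBGo, h1]; simpa using h'
def iniIsSec (line : String) : Bool := PySem.Str.lower (PySem.Str.strip line) == "[my_info]"

lemma iniBGo_snd (myrig : String) (l : List String) (i : Nat)
    (h : iniALoop1 myrig l = none) :
    (iniBGo myrig l none i).2 = (l.findIdx? iniIsSec).map (· + i) := by
  induction l generalizing i with
  | nil => rfl
  | cons line rest ih =>
    by_cases h1 : PySem.Str.startswith (PySem.Str.lower (PySem.Str.strip line)) "myrig=" = true
    · exfalso
      simp only [iniALoop1, if_pos h1] at h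
      exact opt_ite_ne_none _ _ h
    · rw [Bool.not_eq_true] at h1
      have hrest : iniALoop1 myrig rest = none := by
        simp only [iniALoop1, h1] at h
        simpa using h
      by_cases hs : (PySem.Str.lower (PySem.Str.strip line) == "[my_info]") = true
      · rcases iniBGo_snd_some myrig rest i (i + 1) with h2 | h2
        · simp only [iniBGo, h1, List.findIdx?_cons, iniIsSec, hs]
          simpa using h2
        · exfalso
          rw [iniBGo_fst, hrest] at h2
          exact h2 rfl
      · rw [Bool.not_eq_true] at hs
        have htail := ih (i + 1) hrest
        simp only [iniBGo, h1, List.findIdx?_cons, iniIsSec, hs]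
        rcases hrec : iniBGo myrig rest none (i + 1) with ⟨r?, j?⟩
        rw [hrec] at htail
        simp only at htail
        simp only [Option.isNone_none, Bool.true_and, Bool.false_eq_true, if_false]
        rw [hrec]
        simp only [htail, Option.map_map]
        cases List.findIdx? iniIsSec rest with
        | none => rfl
        | some j => simp only [Option.map_some, Function.comp_apply, Option.some.injEq]; omega
lemma iniALoop2_eq (myrig : String) (l : List String) :
    iniALoop2 myrig l = (l.findIdx? iniIsSec).map
      (fun j => l.take (j + 1) ++ PySem.Str.join "" ["MyRIG=", myrig, " emcomm-tools.ca\n"] :: l.drop (j + 1)) := by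
  induction l with
  | nil => rfl
  | cons line rest ih =>
    by_cases hs : (PySem.Str.lower (PySem.Str.strip line) == "[my_info]") = true
    · simp only [iniALoop2, List.findIdx?_cons, iniIsSec, hs, if_true, Option.map_some]
      simp
    · rw [Bool.not_eq_true] at hs
      simp only [iniALoop2, List.findIdx?_cons, iniIsSec, hs, ih, Option.map_map,
        Bool.false_eq_true, if_false]
      cases List.findIdx? iniIsSec rest with
      | none => rfl
      | some j =>
        simp only [Option.map_some, Function.comp_apply, Option.some.injEq]
        simp [List.take_succ_cons, List.drop_succ_cons]

lemma iniFindIdx_lt (l : List String) (j : Nat) (h : l.findIdx? iniIsSec = some j) :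
    j < l.length := by
  have h2 := List.of_findIdx?_eq_some h
  cases hg : l[j]? with
  | none => rw [hg] at h2; simp at h2
  | some a => exact (List.getElem?_eq_some_iff.mp hg).1

-- ===== VERDICT (by name: the statement is the Claim_ definition above) =====
theorem ini_update_rig_py_spec : Claim_equal_ini_update_rig_py := by
  intro lines myrig _
  unfold Spec_ini_update_rig_py ini_update_rig_py ini_update_rig_py_alt
  rcases hb : iniBGo myrig lines none 0 with ⟨r?, j?⟩
  have hfst := iniBGo_fst myrig lines none 0
  rw [hb] at hfst
  simp only at hfst
  cases r? with
  | some r => simp [← hfst]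
  | none =>
    have hA1 : iniALoop1 myrig lines = none := hfst.symm
    have hsnd := iniBGo_snd myrig lines 0 hA1
    rw [hb] at hsnd
    simp only at hsnd
    rw [hA1, iniALoop2_eq]
    cases hf : lines.findIdx? iniIsSec with
    | none =>
      rw [hf] at hsnd
      simp only [Option.map_none] at hsnd
      subst hsnd
      rfl
    | some j =>
      rw [hf] at hsnd
      simp only [Option.map_some, Nat.add_zero] at hsnd
      subst hsnd
      have hjlt : j < lines.length := iniFindIdx_lt lines j hf
      have hins : PySem.List.insert lines ((j : Int) + 1)
            (PySem.Str.join "" ["MyRIG=", myrig, " emcomm-tools.ca\n"])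
          = lines.take (j + 1) ++ PySem.Str.join "" ["MyRIG=", myrig, " emcomm-tools.ca\n"] :: lines.drop (j + 1) := by
        rw [show ((j : Int) + 1) = (((j + 1 : Nat)) : Int) by push_cast; ring]
        exact PySem.List.insert_natCast lines (j + 1) _ (by omega)
      simp [hins]
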